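-- pv_equiv track=rewrite | github.com/danikonova/lab6 | lab6_part2.py | minimize_pairs
-- ===== SOURCE A (Python) =====
-- def find_pairs(numbers, target_sum, max_diff):        #перебор всех возможных пар чисел из списка numbers и проверка на удовлетворение условию задачи.
--     pairs = []
--     for i in range(len(numbers)):
--         for j in range(i+1, len(numbers)):
--             if numbers[i] + numbers[j] == target_sum and abs(numbers[i] - numbers[j]) <= max_diff:
--                 pairs.append((numbers[i], numbers[j]))
--     return pairs
--
-- def minimize_pairs(numbers, target_sum, max_diff):
--     pairs = find_pairs(numbers, target_sum, max_diff)
--     if len(pairs) == 0:                                #если количество найденных пар равно 0, то функция возвращает пустой список.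
--         return []
--     elif len(pairs) == 1:                              #если количество найденных пар равно 1, то функция возвращает эту пару.
--         return pairs
--     else:                                              #иначе функция разбивает список на две части и рекурсивно вызывает саму себя для каждой из этих частей.
--         mid = len(numbers) // 2
--         left_pairs = minimize_pairs(numbers[:mid], target_sum, max_diff)
--         right_pairs = minimize_pairs(numbers[mid:], target_sum, max_diff)
--         if len(left_pairs) == 0:                       #cравнивнение результатов, полученных для левой и правой частей.
--             return right_pairs
--         elif len(right_pairs) == 0:
--             return left_pairs
--         else:
--             return left_pairs if len(left_pairs) < len(right_pairs) else right_pairs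
-- ===== SOURCE B (Python) =====
-- def _scan2(numbers, target_sum, max_diff):
--     # One left-to-right pass with a hash counter of the elements seen so far.
--     # A valid pair ending at y must start with x = target_sum - y, so each y
--     # contributes count(x) pairs; the total is capped at 2 (all the caller
--     # needs), which allows an early exit.  'first' holds the first valid pair.
--     seen = {}
--     cnt = 0
--     first = []
--     for y in numbers:
--         x = target_sum - y
--         if abs(x - y) <= max_diff:
--             c = seen.get(x, 0)
--             if c:
--                 if not first:
--                     first = [(x, y)]
--                 cnt += c
--                 if cnt >= 2:
--                     return 2, first
--         seen[y] = seen.get(y, 0) + 1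
--     return cnt, first
--
-- def minimize_pairs(numbers, target_sum, max_diff):
--     cnt, first = _scan2(numbers, target_sum, max_diff)
--     if cnt <= 1:
--         return first
--     mid = len(numbers) // 2
--     right = minimize_pairs(numbers[mid:], target_sum, max_diff)
--     if right:
--         return right
--     return minimize_pairs(numbers[:mid], target_sum, max_diff)
-- ===== Notes on version B (the rewrite author's own statement) =====
-- stated objective: faster
-- what changed: The O(n^2) all-pairs double loop run at every recursion level is replaced by a single left-to-right hash-counting pass that counts valid pairs capped at 2 with an early exit (a pair summing to target_sum is determined by its second element), while A's half-splitting recursion is kept.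
import Mathlib
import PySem

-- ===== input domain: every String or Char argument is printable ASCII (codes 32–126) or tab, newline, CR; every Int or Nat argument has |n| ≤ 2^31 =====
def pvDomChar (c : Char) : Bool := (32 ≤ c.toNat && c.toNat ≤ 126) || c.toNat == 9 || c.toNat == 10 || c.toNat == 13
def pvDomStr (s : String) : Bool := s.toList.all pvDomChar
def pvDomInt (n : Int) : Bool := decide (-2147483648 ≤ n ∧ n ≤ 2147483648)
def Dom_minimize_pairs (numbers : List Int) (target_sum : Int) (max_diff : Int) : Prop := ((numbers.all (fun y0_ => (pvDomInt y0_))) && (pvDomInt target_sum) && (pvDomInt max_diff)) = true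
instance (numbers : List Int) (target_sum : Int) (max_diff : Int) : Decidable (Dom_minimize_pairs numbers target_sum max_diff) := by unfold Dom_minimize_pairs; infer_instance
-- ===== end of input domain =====

-- B replaces A's quadratic all-pairs enumeration at every recursion level by a single
-- hash-counting pass (pair count capped at 2, with early exit), keeping A's half-splitting
-- recursion; the equivalence of the return values is proved below.

-- ===== PORT A =====
def find_pairs (numbers : List Int) (target_sum : Int) (max_diff : Int) : List (Int × Int) :=
  (PySem.List.pyRange 0 (numbers.length : Int) 1).foldl (fun pairs i =>
    (PySem.List.pyRange (i + 1) (numbers.length : Int) 1).foldl (fun pairs j =>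
      if PySem.List.pyGetD numbers i 0 + PySem.List.pyGetD numbers j 0 = target_sum ∧
         |PySem.List.pyGetD numbers i 0 - PySem.List.pyGetD numbers j 0| ≤ max_diff
      then pairs ++ [(PySem.List.pyGetD numbers i 0, PySem.List.pyGetD numbers j 0)]
      else pairs) pairs) []

theorem find_pairs_short (numbers : List Int) (t d : Int) (h : numbers.length ≤ 1) :
    find_pairs numbers t d = [] := by
  match numbers, h with
  | [], _ => simp [find_pairs, PySem.List.pyRange_one]
  | [a], _ => simp [find_pairs, PySem.List.pyRange_one]

def minimize_pairs (numbers : List Int) (target_sum : Int) (max_diff : Int) : List (Int × Int) :=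
  if h0 : (find_pairs numbers target_sum max_diff).length = 0 then []
  else if (find_pairs numbers target_sum max_diff).length = 1 then
    find_pairs numbers target_sum max_diff
  else
    let mid := PySem.Int.floordiv (numbers.length : Int) 2
    let left_pairs := minimize_pairs (PySem.List.slice numbers none (some mid)) target_sum max_diff
    let right_pairs := minimize_pairs (PySem.List.slice numbers (some mid) none) target_sum max_diff
    if left_pairs.length = 0 then right_pairs
    else if right_pairs.length = 0 then left_pairs
    else if left_pairs.length < right_pairs.length then left_pairs else right_pairs
termination_by numbers.length
decreasing_by
  · have h2 : 2 ≤ numbers.length := by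
      by_contra hlt
      exact h0 (by rw [find_pairs_short numbers target_sum max_diff (by omega)]; rfl)
    have : PySem.Int.floordiv (numbers.length : Int) 2 = ((numbers.length / 2 : Nat) : Int) := by
      exact_mod_cast PySem.Int.floordiv_natCast numbers.length 2
    rw [this, PySem.List.slice_to_natCast]
    simp; omega
  · have h2 : 2 ≤ numbers.length := by
      by_contra hlt
      exact h0 (by rw [find_pairs_short numbers target_sum max_diff (by omega)]; rfl)
    have : PySem.Int.floordiv (numbers.length : Int) 2 = ((numbers.length / 2 : Nat) : Int) := by
      exact_mod_cast PySem.Int.floordiv_natCast numbers.length 2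
    rw [this, PySem.List.slice_from_natCast]
    simp; omega

-- ===== PORT B =====
def scan2 (numbers : List Int) (target_sum : Int) (max_diff : Int)
    (seen : PySem.Dict Int Int) (cnt : Int) (first : List (Int × Int)) : Int × List (Int × Int) :=
  match numbers with
  | [] => (cnt, first)
  | y :: rest =>
    let x := target_sum - y
    if |x - y| ≤ max_diff then
      let c := seen.getD x 0
      if c ≠ 0 then
        let first' := if first = [] then [(x, y)] else first
        let cnt' := cnt + c
        if 2 ≤ cnt' then (2, first')
        else scan2 rest target_sum max_diff (seen.insert y (seen.getD y 0 + 1)) cnt' first'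
      else scan2 rest target_sum max_diff (seen.insert y (seen.getD y 0 + 1)) cnt first
    else scan2 rest target_sum max_diff (seen.insert y (seen.getD y 0 + 1)) cnt first

theorem scan2_short (numbers : List Int) (t d : Int) (h : numbers.length ≤ 1) :
    (scan2 numbers t d PySem.Dict.empty 0 []).1 ≤ 1 := by
  match numbers, h with
  | [], _ => simp [scan2]
  | [a], _ =>
    simp [scan2, PySem.Dict.getD_empty]

def minimize_pairs_alt (numbers : List Int) (target_sum : Int) (max_diff : Int) : List (Int × Int) :=
  if h : (scan2 numbers target_sum max_diff PySem.Dict.empty 0 []).1 ≤ 1 then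
    (scan2 numbers target_sum max_diff PySem.Dict.empty 0 []).2
  else
    let mid := PySem.Int.floordiv (numbers.length : Int) 2
    let right := minimize_pairs_alt (PySem.List.slice numbers (some mid) none) target_sum max_diff
    if right ≠ [] then right
    else minimize_pairs_alt (PySem.List.slice numbers none (some mid)) target_sum max_diff
termination_by numbers.length
decreasing_by
  · have h2 : 2 ≤ numbers.length := by
      by_contra hlt
      exact h (scan2_short numbers target_sum max_diff (by omega))
    have : PySem.Int.floordiv (numbers.length : Int) 2 = ((numbers.length / 2 : Nat) : Int) := by
      exact_mod_cast PySem.Int.floordiv_natCast numbers.length 2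
    rw [this, PySem.List.slice_from_natCast]
    simp; omega
  · have h2 : 2 ≤ numbers.length := by
      by_contra hlt
      exact h (scan2_short numbers target_sum max_diff (by omega))
    have : PySem.Int.floordiv (numbers.length : Int) 2 = ((numbers.length / 2 : Nat) : Int) := by
      exact_mod_cast PySem.Int.floordiv_natCast numbers.length 2
    rw [this, PySem.List.slice_to_natCast]
    simp; omega

-- Bool condition for a valid pair, and the per-head segment of find_pairs

-- ===== PRECONDITION & SPEC =====
def Spec_minimize_pairs (numbers : List Int) (target_sum : Int) (max_diff : Int) (out : List (Int × Int)) : Prop := out = minimize_pairs_alt numbers target_sum max_diff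
instance (numbers : List Int) (target_sum : Int) (max_diff : Int) (out : List (Int × Int)) : Decidable (Spec_minimize_pairs numbers target_sum max_diff out) := by unfold Spec_minimize_pairs; infer_instance

-- ===== CLAIM (what is proved, stated in full; the proofs are below) =====
def Claim_equal_minimize_pairs : Prop := ∀ (numbers : List Int) (target_sum : Int) (max_diff : Int), Dom_minimize_pairs numbers target_sum max_diff → Spec_minimize_pairs numbers target_sum max_diff (minimize_pairs numbers target_sum max_diff)

-- ===== LEMMAS AND PROOFS =====

def pOK (t d x y : Int) : Bool := decide (x + y = t ∧ |x - y| ≤ d)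

theorem foldl_append_ite_map {α β : Type} (P : α → Prop) [DecidablePred P] (f : α → β)
    (l : List α) (acc : List β) :
    l.foldl (fun acc x => if P x then acc ++ [f x] else acc) acc
      = acc ++ (l.filter (fun x => decide (P x))).map f := by
  have := PySem.List.foldl_append_if (fun x => decide (P x)) f l acc
  simpa using this

theorem find_pairs_flat (numbers : List Int) (t d : Int) :
    find_pairs numbers t d
      = (PySem.List.pyRange 0 (numbers.length : Int) 1).flatMap (fun i =>
          ((numbers.drop (i.toNat + 1)).filter (fun y => pOK t d (PySem.List.pyGetD numbers i 0) y)).map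
            (fun y => (PySem.List.pyGetD numbers i 0, y))) := by
  unfold find_pairs
  rw [PySem.List.foldl_congr_mem (g := fun pairs i =>
    pairs ++ ((numbers.drop (i.toNat + 1)).filter (fun y => pOK t d (PySem.List.pyGetD numbers i 0) y)).map
      (fun y => (PySem.List.pyGetD numbers i 0, y)))]
  · rw [PySem.List.foldl_append_eq_flatMap]; rfl
  · intro acc i hi
    have hi0 : 0 ≤ i := (PySem.List.mem_pyRange_one.mp hi).1
    rw [PySem.List.foldl_pyRange_pyGetD' numbers 0
      (fun pairs y => if PySem.List.pyGetD numbers i 0 + y = t ∧ |PySem.List.pyGetD numbers i 0 - y| ≤ d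
        then pairs ++ [(PySem.List.pyGetD numbers i 0, y)] else pairs) acc (a := i+1) (by omega)]
    have : (i + 1).toNat = i.toNat + 1 := by omega
    rw [this, foldl_append_ite_map]
    rfl

theorem find_pairs_nil (t d : Int) : find_pairs [] t d = [] := rfl

theorem find_pairs_cons (x : Int) (rest : List Int) (t d : Int) :
    find_pairs (x :: rest) t d
      = (rest.filter (fun y => pOK t d x y)).map (fun y => (x, y)) ++ find_pairs rest t d := by
  rw [find_pairs_flat, find_pairs_flat]
  have hlen : ((x :: rest).length : Int) = (rest.length : Int) + 1 := by simp
  rw [hlen, PySem.List.pyRange_one_cons (by omega)]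
  rw [List.flatMap_cons]
  congr 1
  · simp [PySem.List.pyGetD_zero_cons]
  · have h1 : PySem.List.pyRange (0 + 1) ((rest.length : Int) + 1)
        = (List.range rest.length).map (fun (k : Nat) => (1 : Int) + (k : Int)) := by
      rw [PySem.List.pyRange_one]
      have e0 : (((rest.length : Int) + 1) - (0 + 1)).toNat = rest.length := by omega
      rw [e0]
      norm_num
    have h2 : PySem.List.pyRange 0 ((rest.length : Int))
        = (List.range rest.length).map (fun (k : Nat) => ((k : Nat) : Int)) := by
      rw [PySem.List.pyRange_one]
      have e0 : (((rest.length : Int)) - 0).toNat = rest.length := by omega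
      rw [e0]
      norm_num
    rw [h1, h2, List.flatMap_map, List.flatMap_map]
    congr 1
    funext k
    have e1 : (1 : Int) + (k : Int) = ((k + 1 : Nat) : Int) := by push_cast; ring
    rw [e1, PySem.List.pyGetD_natCast, PySem.List.pyGetD_natCast]
    simp

-- pairs contributed by each element y of the remaining list against a prefix p
def c1 (t d : Int) (p : List Int) (y : Int) : List (Int × Int) :=
  if |t - y - y| ≤ d then List.replicate (p.count (t - y)) (t - y, y) else []

def gpre (t d : Int) (p l : List Int) : List (Int × Int) :=
  match l with
  | [] => []
  | y :: rest => c1 t d p y ++ gpre t d (p ++ [y]) rest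

theorem c1_append (t d : Int) (p q : List Int) (y : Int) :
    c1 t d (p ++ q) y = c1 t d p y ++ c1 t d q y := by
  unfold c1
  split_ifs with h
  · rw [List.count_append, List.replicate_add]
  · rfl

theorem flatMap_append_perm {α β : Type} (f g : α → List β) (l : List α) :
    (l.flatMap (fun z => f z ++ g z)).Perm (l.flatMap f ++ l.flatMap g) := by
  induction l with
  | nil => simp
  | cons y rest ih =>
    simp only [List.flatMap_cons]
    refine (ih.append_left _).trans ?_
    rw [List.append_assoc, List.append_assoc]
    exact (List.perm_append_comm_assoc (g y) (rest.flatMap f) (rest.flatMap g)).append_left _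

theorem c1_single (t d y z : Int) :
    c1 t d [y] z = if pOK t d y z then [(y, z)] else [] := by
  unfold c1 pOK
  by_cases he : t - z = y
  · subst he
    have hsum : t - z + z = t := by omega
    simp only [List.count_singleton, BEq.rfl, if_pos]
    split_ifs with h1 h2 h2 <;> first | (simp_all; omega) | simp_all
  · have h0 : List.count (t - z) [y] = 0 := by
      simp [List.count_singleton]
      omega
    have hb : pOK t d y z = false := by
      unfold pOK
      simp only [decide_eq_false_iff_not]
      rintro ⟨h1, _⟩
      exact he (by omega)
    unfold pOK at hb
    simp [h0, hb]

theorem flatMap_c1_single (t d y : Int) (rest : List Int) :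
    rest.flatMap (c1 t d [y]) = (rest.filter (fun z => pOK t d y z)).map (fun z => (y, z)) := by
  induction rest with
  | nil => rfl
  | cons z rs ih =>
    simp only [List.flatMap_cons, List.filter_cons, c1_single, ih]
    cases h : pOK t d y z
    · simp
    · simp

theorem gpre_perm (t d : Int) : ∀ (l p : List Int),
    (gpre t d p l).Perm (l.flatMap (c1 t d p) ++ find_pairs l t d) := by
  intro l
  induction l with
  | nil => intro p; simp [gpre, find_pairs_nil]
  | cons y rest ih =>
    intro p
    show (c1 t d p y ++ gpre t d (p ++ [y]) rest).Perm _
    have hsplit : c1 t d (p ++ [y]) = fun z => c1 t d p z ++ c1 t d [y] z :=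
      funext (c1_append t d p [y])
    have h1 : (gpre t d (p ++ [y]) rest).Perm
        (rest.flatMap (c1 t d p) ++
          ((rest.filter (fun z => pOK t d y z)).map (fun z => (y, z)) ++ find_pairs rest t d)) := by
      have h := ih (p ++ [y])
      rw [hsplit] at h
      refine h.trans ?_
      refine ((flatMap_append_perm _ _ rest).append_right _).trans ?_
      rw [flatMap_c1_single, List.append_assoc]
    have h2 := h1.append_left (c1 t d p y)
    rw [find_pairs_cons, List.flatMap_cons]
    simpa [List.append_assoc] using h2

theorem gpre_perm_top (t d : Int) (numbers : List Int) :
    (gpre t d [] numbers).Perm (find_pairs numbers t d) := by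
  have h := gpre_perm t d numbers []
  have : numbers.flatMap (c1 t d []) = [] := by
    induction numbers with
    | nil => rfl
    | cons y rest ih => simp [List.flatMap_cons, c1]
  rw [this] at h
  simpa using h

theorem scan_run (t d : Int) (rest : List Int) :
    ∀ (p : List Int) (seen : PySem.Dict Int Int) (cnt : Int) (first : List (Int × Int)),
    (∀ v, seen.getD v 0 = (p.count v : Int)) →
    ((cnt = 0 ∧ first = []) ∨ (cnt = 1 ∧ first.length = 1)) →
    (2 ≤ cnt.toNat + (gpre t d p rest).length → (scan2 rest t d seen cnt first).1 = 2) ∧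
    (cnt.toNat + (gpre t d p rest).length < 2 →
      scan2 rest t d seen cnt first = (cnt + ((gpre t d p rest).length : Int), first ++ gpre t d p rest)) := by
  induction rest with
  | nil =>
    intro p seen cnt first hseen hinv
    constructor
    · intro h2
      exfalso
      rcases hinv with ⟨h, _⟩ | ⟨h, _⟩ <;> subst h <;> simp [gpre] at h2
    · intro _
      simp [scan2, gpre]
  | cons y rs ih =>
    intro p seen cnt first hseen hinv
    have hseen' : ∀ v, (seen.insert y (seen.getD y 0 + 1)).getD v 0 = ((p ++ [y]).count v : Int) := by
      intro v
      by_cases hv : v = y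
      · subst hv
        rw [PySem.Dict.getD_insert_self, hseen]
        simp [List.count_append]
      · rw [PySem.Dict.getD_insert_of_ne _ _ _ hv, hseen]
        simp [List.count_append, List.count_singleton]; omega
    have hgpre : gpre t d p (y :: rs) = c1 t d p y ++ gpre t d (p ++ [y]) rs := rfl
    by_cases hv : |t - y - y| ≤ d
    · have hc1 : c1 t d p y = List.replicate (p.count (t - y)) (t - y, y) := by
        simp [c1, hv]
      by_cases hm : p.count (t - y) = 0
      · -- no new pair at y: recurse with unchanged cnt/first
        have hstep : scan2 (y :: rs) t d seen cnt first
            = scan2 rs t d (seen.insert y (seen.getD y 0 + 1)) cnt first := by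
          simp only [scan2]
          rw [if_pos hv, hseen (t - y)]
          simp [hm]
        rw [hstep, hgpre, hc1, hm]
        simpa using ih (p ++ [y]) _ cnt first hseen' hinv
      · -- at least one new pair at y
        have hmpos : 1 ≤ p.count (t - y) := Nat.one_le_iff_ne_zero.mpr hm
        rcases hinv with ⟨hc, hf⟩ | ⟨hc, hf⟩
        · -- cnt = 0, first = []
          subst hc; subst hf
          by_cases h2m : 2 ≤ p.count (t - y)
          · have hstep : scan2 (y :: rs) t d seen 0 []
                = (2, [(t - y, y)]) := by
              simp only [scan2]
              rw [if_pos hv, hseen (t - y)]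
              rw [if_pos (by exact_mod_cast hm)]
              simp only [if_true]
              rw [if_pos (by omega)]
            rw [hstep, hgpre, hc1]
            constructor
            · intro _; rfl
            · intro hlt; exfalso; simp [List.length_append] at hlt; omega
          · have hm1 : p.count (t - y) = 1 := by omega
            have hstep : scan2 (y :: rs) t d seen 0 []
                = scan2 rs t d (seen.insert y (seen.getD y 0 + 1)) 1 [(t - y, y)] := by
              simp only [scan2]
              rw [if_pos hv, hseen (t - y)]
              rw [if_pos (by exact_mod_cast hm)]
              simp only [if_true]
              rw [if_neg (by omega), hm1]
              norm_num
            have hih := ih (p ++ [y]) _ 1 [(t - y, y)] hseen' (Or.inr ⟨rfl, rfl⟩)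
            rw [hstep, hgpre, hc1, hm1]
            constructor
            · intro h2
              apply hih.1
              simp at h2 ⊢
              omega
            · intro hlt
              simp at hlt
              rw [hih.2 (by simp; omega)]
              simp
              omega
        · -- cnt = 1, first = [q]
          subst hc
          have hfne : first ≠ [] := by
            intro h; rw [h] at hf; simp at hf
          have hstep : scan2 (y :: rs) t d seen 1 first = (2, first) := by
            simp only [scan2]
            rw [if_pos hv, hseen (t - y)]
            rw [if_pos (by exact_mod_cast hm)]
            rw [if_neg hfne]
            rw [if_pos (by omega)]
          rw [hstep, hgpre, hc1]
          constructor
          · intro _; rfl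
          · intro hlt; exfalso; simp [List.length_append] at hlt; omega
    · -- invalid y: no pair possible, recurse
      have hc1 : c1 t d p y = [] := by simp [c1, hv]
      have hstep : scan2 (y :: rs) t d seen cnt first
          = scan2 rs t d (seen.insert y (seen.getD y 0 + 1)) cnt first := by
        simp only [scan2]
        rw [if_neg hv]
      rw [hstep, hgpre, hc1]
      simpa using ih (p ++ [y]) _ cnt first hseen' hinv

theorem mp_unfold (numbers : List Int) (t d : Int) :
    minimize_pairs numbers t d =
      if (find_pairs numbers t d).length = 0 then []
      else if (find_pairs numbers t d).length = 1 then find_pairs numbers t d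
      else
        if (minimize_pairs (numbers.take (numbers.length / 2)) t d).length = 0 then
          minimize_pairs (numbers.drop (numbers.length / 2)) t d
        else if (minimize_pairs (numbers.drop (numbers.length / 2)) t d).length = 0 then
          minimize_pairs (numbers.take (numbers.length / 2)) t d
        else if (minimize_pairs (numbers.take (numbers.length / 2)) t d).length
              < (minimize_pairs (numbers.drop (numbers.length / 2)) t d).length then
          minimize_pairs (numbers.take (numbers.length / 2)) t d
        else minimize_pairs (numbers.drop (numbers.length / 2)) t d := by
  rw [minimize_pairs]
  have hmid : PySem.Int.floordiv ((numbers.length : Int)) 2 = ((numbers.length / 2 : Nat) : Int) := by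
    exact_mod_cast PySem.Int.floordiv_natCast numbers.length 2
  rw [hmid]
  simp only [PySem.List.slice_to_natCast, PySem.List.slice_from_natCast, dite_eq_ite]

theorem mpalt_unfold (numbers : List Int) (t d : Int) :
    minimize_pairs_alt numbers t d =
      if (scan2 numbers t d PySem.Dict.empty 0 []).1 ≤ 1 then
        (scan2 numbers t d PySem.Dict.empty 0 []).2
      else
        if minimize_pairs_alt (numbers.drop (numbers.length / 2)) t d ≠ [] then
          minimize_pairs_alt (numbers.drop (numbers.length / 2)) t d
        else minimize_pairs_alt (numbers.take (numbers.length / 2)) t d := by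
  rw [minimize_pairs_alt]
  have hmid : PySem.Int.floordiv ((numbers.length : Int)) 2 = ((numbers.length / 2 : Nat) : Int) := by
    exact_mod_cast PySem.Int.floordiv_natCast numbers.length 2
  rw [hmid]
  simp only [PySem.List.slice_to_natCast, PySem.List.slice_from_natCast, dite_eq_ite]

theorem find_pairs_len2 (numbers : List Int) (t d : Int)
    (h : (find_pairs numbers t d).length ≠ 0) : 2 ≤ numbers.length := by
  by_contra hlt
  exact h (by rw [find_pairs_short numbers t d (by omega)]; rfl)

theorem lenA (n : Nat) : ∀ (numbers : List Int) (t d : Int), numbers.length ≤ n →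
    (minimize_pairs numbers t d).length ≤ 1 := by
  induction n with
  | zero =>
    intro numbers t d h
    have hnil : numbers = [] := List.length_eq_zero_iff.mp (by omega)
    subst hnil
    rw [mp_unfold]
    simp [find_pairs_nil]
  | succ n ih =>
    intro numbers t d h
    rw [mp_unfold]
    split_ifs with h0 h1 ha hb hc
    · simp
    · omega
    all_goals {
      have h2 := find_pairs_len2 numbers t d h0
      first
        | exact ih (numbers.take (numbers.length / 2)) t d (by simp; omega)
        | exact ih (numbers.drop (numbers.length / 2)) t d (by simp; omega)
    }

theorem scan_top (numbers : List Int) (t d : Int) :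
    (2 ≤ (gpre t d [] numbers).length → (scan2 numbers t d PySem.Dict.empty 0 []).1 = 2) ∧
    ((gpre t d [] numbers).length < 2 →
      scan2 numbers t d PySem.Dict.empty 0 []
        = (((gpre t d [] numbers).length : Int), gpre t d [] numbers)) := by
  have h := scan_run t d numbers [] PySem.Dict.empty 0 []
    (by intro v; simp [PySem.Dict.getD_empty]) (Or.inl ⟨rfl, rfl⟩)
  simpa using h

theorem mp_eq (n : Nat) : ∀ (numbers : List Int) (t d : Int), numbers.length ≤ n →
    minimize_pairs numbers t d = minimize_pairs_alt numbers t d := by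
  induction n with
  | zero =>
    intro numbers t d h
    have hnil : numbers = [] := List.length_eq_zero_iff.mp (by omega)
    subst hnil
    rw [mp_unfold, mpalt_unfold]
    have hs := (scan_top [] t d).2 (by simp [gpre])
    simp [find_pairs_nil, hs, gpre]
  | succ n ih =>
    intro numbers t d h
    have hperm := gpre_perm_top t d numbers
    have hlen : (gpre t d [] numbers).length = (find_pairs numbers t d).length :=
      hperm.length_eq
    rw [mp_unfold, mpalt_unfold]
    by_cases h0 : (find_pairs numbers t d).length = 0
    · rw [if_pos h0]
      have hs := (scan_top numbers t d).2 (by omega)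
      have hgnil : gpre t d [] numbers = [] := by
        apply List.length_eq_zero_iff.mp; omega
      rw [if_pos (by rw [hs]; simp; omega), hs, hgnil]
    · by_cases h1 : (find_pairs numbers t d).length = 1
      · rw [if_neg h0, if_pos h1]
        have hs := (scan_top numbers t d).2 (by omega)
        have hg : gpre t d [] numbers = find_pairs numbers t d := by
          obtain ⟨a, ha⟩ := List.length_eq_one_iff.mp h1
          rw [ha] at hperm ⊢
          exact List.perm_singleton.mp hperm
        rw [if_pos (by rw [hs]; simp; omega), hs, hg]
      · rw [if_neg h0, if_neg h1]
        have hs1 := (scan_top numbers t d).1 (by omega)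
        rw [if_neg (show ¬((scan2 numbers t d PySem.Dict.empty 0 []).1 ≤ 1) by rw [hs1]; omega)]
        have h2 := find_pairs_len2 numbers t d h0
        have hL := ih (numbers.take (numbers.length / 2)) t d (by simp; omega)
        have hR := ih (numbers.drop (numbers.length / 2)) t d (by simp; omega)
        have hRlen := lenA n (numbers.drop (numbers.length / 2)) t d (by simp; omega)
        rw [← hL, ← hR]
        set L := minimize_pairs (numbers.take (numbers.length / 2)) t d with hLdef
        set R := minimize_pairs (numbers.drop (numbers.length / 2)) t d with hRdef
        by_cases hRnil : R = []
        · rw [if_neg (show ¬(R ≠ []) by simpa using hRnil)]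
          by_cases hLnil : L.length = 0
          · rw [if_pos hLnil, hRnil]
            exact (List.length_eq_zero_iff.mp hLnil).symm
          · rw [if_neg hLnil, if_pos (by rw [hRnil]; rfl)]
        · rw [if_pos hRnil]
          by_cases hLnil : L.length = 0
          · rw [if_pos hLnil]
          · rw [if_neg hLnil,
              if_neg (show ¬(R.length = 0) from fun hh => hRnil (List.length_eq_zero_iff.mp hh)),
              if_neg (show ¬(L.length < R.length) by
                have : 1 ≤ L.length := by omega
                omega)]

-- ===== VERDICT (by name: the statement is the Claim_ definition above) =====
theorem minimize_pairs_spec : Claim_equal_minimize_pairs := by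
  intro numbers target_sum max_diff _
  unfold Spec_minimize_pairs
  exact mp_eq numbers.length numbers target_sum max_diff le_rfl
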